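-- pv_equiv track=rewrite | github.com/yanggelinux/algorithm-data-structure | algorithm/dijkstra_search.py | get_min_val
-- ===== SOURCE A (Python) =====
-- def get_min_val(dicts={}):
--     if dicts:
--         val_list = []
--         re_dicts = {}
--         for k,v in dicts.items():
--             val_list.append(v)
--             re_dicts[v] = k
--         min_val = min(val_list)
--         min_key = re_dicts[min_val]
--         return min_key
-- ===== SOURCE B (Python) =====
-- def get_min_val(dicts={}):
--     min_key = None
--     min_val = None
--     for k, v in dicts.items():
--         if min_key is None or v <= min_val:
--             min_key, min_val = k, v
--     return min_key
-- ===== Notes on version B (the rewrite author's own statement) =====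
-- stated objective: simpler
-- what changed: Replaces the build-value-list + reverse-dict + min + lookup pipeline by one tracking scan over items() that keeps the current minimum key/value (updating on <= so the last key with the minimum wins, as A's reverse-dict overwrite does).
import Mathlib
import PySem

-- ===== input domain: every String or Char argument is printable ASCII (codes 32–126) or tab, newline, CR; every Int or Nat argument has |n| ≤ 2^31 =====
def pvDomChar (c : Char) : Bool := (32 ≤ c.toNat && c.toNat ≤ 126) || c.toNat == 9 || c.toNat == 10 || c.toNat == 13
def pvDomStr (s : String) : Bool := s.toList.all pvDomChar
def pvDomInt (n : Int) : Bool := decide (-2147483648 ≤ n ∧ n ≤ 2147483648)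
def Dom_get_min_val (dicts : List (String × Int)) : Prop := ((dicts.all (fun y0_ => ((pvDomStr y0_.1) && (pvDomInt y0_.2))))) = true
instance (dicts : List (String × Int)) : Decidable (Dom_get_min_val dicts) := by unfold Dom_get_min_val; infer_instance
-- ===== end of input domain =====

-- B replaces A's value-list + reverse-dict + min + lookup pipeline by a single
-- tracking scan (objective: simpler); same return value everywhere.

-- ===== PORT A =====
def get_min_val (dicts : List (String × Int)) : Option String :=
  if dicts ≠ [] then
    -- val_list / re_dicts built in one loop over items, as in A
    let st := dicts.foldl
      (fun (st : List Int × PySem.Dict Int String) kv =>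
        (st.1 ++ [kv.2], st.2.insert kv.2 kv.1))
      ([], PySem.Dict.empty)
    match PySem.List.min? st.1 (fun v => v) with
    | some min_val => st.2.get? min_val
    | none => none   -- unreachable: dicts ≠ [] so val_list ≠ []
  else none

-- ===== PORT B =====
def get_min_val_alt (dicts : List (String × Int)) : Option String :=
  (dicts.foldl
    (fun (acc : Option (String × Int)) kv =>
      match acc with
      | none => some kv
      | some (mk, mv) => if kv.2 ≤ mv then some kv else some (mk, mv))
    none).map Prod.fst

-- ===== PRECONDITION & SPEC =====
def Spec_get_min_val (dicts : List (String × Int)) (out : Option String) : Prop := out = get_min_val_alt dicts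
instance (dicts : List (String × Int)) (out : Option String) : Decidable (Spec_get_min_val dicts out) := by unfold Spec_get_min_val; infer_instance

-- ===== CLAIM (what is proved, stated in full; the proofs are below) =====
def Claim_equal_get_min_val : Prop := ∀ (dicts : List (String × Int)), Dom_get_min_val dicts → Spec_get_min_val dicts (get_min_val dicts)

-- ===== LEMMAS AND PROOFS =====

-- A's single loop splits into the value list and the reverse dict
lemma aFold_split (l : List (String × Int)) (vl : List Int) (d : PySem.Dict Int String) :
    l.foldl (fun (st : List Int × PySem.Dict Int String) kv =>
        (st.1 ++ [kv.2], st.2.insert kv.2 kv.1)) (vl, d)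
      = (vl ++ l.map Prod.snd, l.foldl (fun d kv => d.insert kv.2 kv.1) d) := by
  induction l generalizing vl d with
  | nil => simp
  | cons a t ih => simp [ih]

-- joint invariant: B's scan holds the last key attaining the minimum value,
-- the minimum value itself equals min of the value list, and A's reverse dict
-- maps that minimum to the same key
lemma main_inv (l : List (String × Int)) (h : l ≠ []) :
    ∃ k m,
      l.foldl (fun (acc : Option (String × Int)) kv =>
          match acc with
          | none => some kv
          | some (mk, mv) => if kv.2 ≤ mv then some kv else some (mk, mv)) none
        = some (k, m)
      ∧ PySem.List.min? (l.map Prod.snd) (fun v => v) = some m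
      ∧ (l.foldl (fun d kv => d.insert kv.2 kv.1) (PySem.Dict.empty (κ := Int) (ν := String))).get? m
          = some k := by
  induction l using List.reverseRecOn with
  | nil => exact absurd rfl h
  | append_singleton t a ih =>
    cases t with
    | nil =>
      refine ⟨a.1, a.2, by simp, ?_, ?_⟩
      · simp [PySem.List.min?_id_cons]
      · simp [PySem.Dict.get?_insert_self]
    | cons b t' =>
      obtain ⟨k, m, hb, hm, hd⟩ := ih (by simp)
      by_cases hle : a.2 ≤ m
      · refine ⟨a.1, a.2, ?_, ?_, ?_⟩
        · rw [List.foldl_append, hb]; simp [hle]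
        · rw [List.map_cons, PySem.List.min?_id_cons] at hm
          have hm' : (t'.map Prod.snd).foldl min b.2 = m := by simpa using hm
          rw [List.map_append, List.map_cons, List.cons_append,
            PySem.List.min?_id_cons, List.foldl_append, hm']
          simp [min_eq_right hle]
        · rw [List.foldl_append]
          simp [List.foldl_cons, List.foldl_nil, PySem.Dict.get?_insert_self]
      · refine ⟨k, m, ?_, ?_, ?_⟩
        · rw [List.foldl_append, hb]; simp [hle]
        · rw [List.map_cons, PySem.List.min?_id_cons] at hm
          have hm' : (t'.map Prod.snd).foldl min b.2 = m := by simpa using hm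
          rw [List.map_append, List.map_cons, List.cons_append,
            PySem.List.min?_id_cons, List.foldl_append, hm']
          simp [min_eq_left (le_of_lt (lt_of_not_ge hle))]
        · rw [List.foldl_append]
          have hne : ¬ m = a.2 := by omega
          simp only [List.foldl_cons, List.foldl_nil]
          rw [PySem.Dict.get?_insert]
          simpa [hne] using hd

-- ===== VERDICT (by name: the statement is the Claim_ definition above) =====
theorem get_min_val_spec : Claim_equal_get_min_val := by
  intro dicts _
  unfold Spec_get_min_val get_min_val get_min_val_alt
  by_cases h : dicts = []
  · subst h; simp
  · obtain ⟨k, m, hb, hm, hd⟩ := main_inv dicts h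
    simp [h, aFold_split, hm, hb, hd]
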